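-- pv_equiv track=rewrite | github.com/LANL-Bioinformatics/assay_validation | scripts/ncbi_download.py | split_indices
-- ===== SOURCE A (Python) =====
-- split_size = 200
--
-- def split_indices(id_list):
--     ''' Get indices for splitting id list '''
--     list_length = len(id_list)
--
--     split_idx_list = []
--     if list_length >= split_size:
--         splits = int( list_length / split_size )
--         for i in range(splits):
--             split_idx_list.append([ (i)*split_size, (i + 1)*split_size ])
--         if (i + 1)*split_size != list_length:
--             split_idx_list.append([(i + 1)*split_size, list_length])
--     else:
--         split_idx_list.append([0, list_length])
--
--     return split_idx_list
-- ===== SOURCE B (Python) =====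
-- split_size = 200
--
-- def split_indices(id_list):
--     ''' Get indices for splitting id list '''
--     n = len(id_list)
--     out = []
--     end = n
--     while end > 0:
--         start = (end - 1) // split_size * split_size
--         out.append([start, end])
--         end = start
--     out.reverse()
--     return out or [[0, 0]]
-- ===== Notes on version B (the rewrite author's own statement) =====
-- stated objective: alternative
-- what changed: Builds the chunk list back-to-front: a while loop starts at the list's end, derives each chunk's start by flooring end-1 to a multiple of 200 and steps downward to 0, then reverses - replacing A's forward count-full-chunks loop plus conditional remainder append plus separate short-list branch.
import Mathlib
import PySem

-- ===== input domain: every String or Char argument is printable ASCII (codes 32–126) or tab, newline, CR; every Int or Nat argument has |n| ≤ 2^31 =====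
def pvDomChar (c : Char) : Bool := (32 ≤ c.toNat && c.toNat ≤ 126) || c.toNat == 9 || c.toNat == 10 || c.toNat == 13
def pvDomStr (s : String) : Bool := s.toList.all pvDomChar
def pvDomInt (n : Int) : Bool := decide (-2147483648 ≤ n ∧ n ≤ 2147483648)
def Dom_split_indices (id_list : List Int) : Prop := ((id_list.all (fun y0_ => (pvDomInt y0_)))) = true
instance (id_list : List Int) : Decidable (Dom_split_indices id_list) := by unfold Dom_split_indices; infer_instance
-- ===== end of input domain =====

-- B computes the chunks BACK-TO-FRONT: starting from the list's end it derives each chunk's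
-- start by flooring (end-1) to a multiple of 200, walks down to 0, then reverses (simpler;
-- same cost; no count-the-full-chunks / remainder / short-list case split).

-- ===== PORT A =====
-- `int(list_length / split_size)` truncates the float quotient; for list lengths (≥ 0,
-- far below 2^53/200) this equals floor division, ported as PySem.Int.floordiv.
-- The read of loop variable `i` after the loop equals splits - 1 (splits ≥ 1 here since
-- list_length ≥ 200, so the loop always runs and `i` is defined).
def split_indices (id_list : List Int) : List (List Int) :=
  let list_length : Int := id_list.length
  if list_length ≥ 200 then
    let splits : Int := PySem.Int.floordiv list_length 200
    let split_idx_list : List (List Int) :=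
      (PySem.List.pyRange 0 splits 1).foldl
        (fun acc i => acc ++ [[i * 200, (i + 1) * 200]]) []
    let i : Int := splits - 1
    if (i + 1) * 200 ≠ list_length then
      split_idx_list ++ [[(i + 1) * 200, list_length]]
    else split_idx_list
  else [[0, list_length]]

-- ===== PORT B =====
-- the `while end > 0` loop, appending [start, end] and stepping end down to start
def splitLoop (e : Int) (out : List (List Int)) : List (List Int) :=
  if _h : e > 0 then
    let start := PySem.Int.floordiv (e - 1) 200 * 200
    splitLoop start (out ++ [[start, e]])
  else out
termination_by e.toNat
decreasing_by
  have h2 : PySem.Int.floordiv (e - 1) 200 = (e - 1) / 200 :=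
    PySem.Int.floordiv_eq_ediv_of_pos (by norm_num)
  simp only [h2]
  omega

def split_indices_alt (id_list : List Int) : List (List Int) :=
  let n : Int := id_list.length
  let out := splitLoop n []
  let out := out.reverse
  if out = [] then [[0, 0]] else out

-- ===== PRECONDITION & SPEC =====
def Spec_split_indices (id_list : List Int) (out : List (List Int)) : Prop := out = split_indices_alt id_list
instance (id_list : List Int) (out : List (List Int)) : Decidable (Spec_split_indices id_list out) := by unfold Spec_split_indices; infer_instance

-- ===== CLAIM (what is proved, stated in full; the proofs are below) =====
def Claim_equal_split_indices : Prop := ∀ (id_list : List Int), Dom_split_indices id_list → Spec_split_indices id_list (split_indices id_list)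

-- ===== LEMMAS AND PROOFS =====

-- the common closed form both ports are reduced to
def strided (n : Int) : List (List Int) :=
  (PySem.List.pyRange 0 n 200).map (fun s => [s, min (s + 200) n])

theorem splitLoop_acc : ∀ (k : Nat) (e : Int), e.toNat = k →
    ∀ (out : List (List Int)), splitLoop e out = out ++ splitLoop e [] := by
  intro k
  induction k using Nat.strong_induction_on with
  | _ k ih =>
    intro e hk out
    by_cases h : e > 0
    · conv_lhs => rw [splitLoop]
      conv_rhs => rw [splitLoop]
      rw [dif_pos h, dif_pos h]
      have h2 : PySem.Int.floordiv (e - 1) 200 = (e - 1) / 200 :=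
        PySem.Int.floordiv_eq_ediv_of_pos (by norm_num)
      simp only [h2]
      have hs : ((e - 1) / 200 * 200).toNat < k := by omega
      rw [ih _ hs _ rfl, ih _ hs _ rfl]
      simp
      conv_rhs => rw [ih _ hs _ rfl]
      simp
    · conv_lhs => rw [splitLoop]
      conv_rhs => rw [splitLoop]
      rw [dif_neg h, dif_neg h]
      simp

theorem strided_step (e : Int) (h : 0 < e) :
    strided ((e - 1) / 200 * 200) ++ [[(e - 1) / 200 * 200, e]] = strided e := by
  set m : Int := (e - 1) / 200 with hmdef
  have hm0 : 0 ≤ m := by omega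
  have hlt : m * 200 < e := by omega
  have hle : e ≤ m * 200 + 200 := by omega
  unfold strided
  rw [PySem.List.pyRange_of_pos 0 (m * 200) (by norm_num),
      PySem.List.pyRange_of_pos 0 e (by norm_num)]
  have hcs : (if (0:Int) < m * 200 then ((m * 200 - 0 + 200 - 1) / 200).toNat else 0)
      = m.toNat := by
    by_cases hms : (0:Int) < m * 200
    · rw [if_pos hms]; omega
    · rw [if_neg hms]; omega
  have hce : (if (0:Int) < e then ((e - 0 + 200 - 1) / 200).toNat else 0)
      = m.toNat + 1 := by
    rw [if_pos (by omega)]; omega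
  rw [hcs, hce, List.range_succ]
  simp only [List.map_append, List.map_map, List.map_cons, List.map_nil]
  congr 1
  · apply List.map_congr_left
    intro j hj
    simp only [List.mem_range] at hj
    have hj' : (j : Int) < m := by omega
    simp only [Function.comp_apply, List.cons.injEq, and_true]
    exact ⟨trivial, by omega⟩
  · simp only [Function.comp_apply, List.cons.injEq, and_true]
    constructor
    · omega
    · omega

theorem rev_splitLoop : ∀ (k : Nat) (e : Int), e.toNat = k →
    (splitLoop e []).reverse = strided e := by
  intro k
  induction k using Nat.strong_induction_on with
  | _ k ih =>
    intro e hk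
    by_cases h : e > 0
    · rw [splitLoop, dif_pos h]
      have h2 : PySem.Int.floordiv (e - 1) 200 = (e - 1) / 200 :=
        PySem.Int.floordiv_eq_ediv_of_pos (by norm_num)
      simp only [h2]
      rw [List.nil_append, splitLoop_acc ((e - 1) / 200 * 200).toNat _ rfl,
          List.reverse_append]
      rw [ih ((e - 1) / 200 * 200).toNat (by omega) _ rfl]
      simpa using strided_step e h
    · rw [splitLoop, dif_neg h]
      unfold strided
      rw [PySem.List.pyRange_of_pos 0 e (by norm_num), if_neg (by omega)]
      simp

theorem strided_ne_nil (n : Int) (hn : 0 < n) : strided n ≠ [] := by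
  unfold strided
  rw [PySem.List.pyRange_of_pos 0 n (by norm_num), if_pos (by omega)]
  simp [List.range_eq_nil]
  omega

theorem strided_zero : strided 0 = [] := by decide

theorem foldl_snoc_map (f : Int → List Int) :
    ∀ (l : List Int) (acc : List (List Int)),
      l.foldl (fun a i => a ++ [f i]) acc = acc ++ l.map f := by
  intro l
  induction l with
  | nil => simp
  | cons x xs ih => intro acc; simp [ih]

-- A reduces to the same closed form (guarded for the empty list)
theorem split_indices_strided (id_list : List Int) :
    split_indices id_list =
      if (id_list.length : Int) = 0 then [[0, 0]] else strided id_list.length := by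
  unfold split_indices strided
  simp only []
  set m : Nat := id_list.length with hm
  by_cases h0 : (m : Int) = 0
  · have : m = 0 := by exact_mod_cast h0
    simp [this]
  · by_cases h200 : (m : Int) ≥ 200
    · simp only [h200, if_pos, if_neg h0]
      rw [PySem.Int.floordiv_eq_ediv_of_pos (by norm_num)]
      rw [PySem.List.pyRange_one, foldl_snoc_map]
      rw [PySem.List.pyRange_of_pos 0 (m : Int) (by norm_num)]
      have hK : (((m:Int)) / 200 - 0).toNat = m / 200 := by omega
      have hC : (if (0:Int) < (m:Int) then (((m:Int) - 0 + 200 - 1) / 200).toNat else 0)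
          = (m + 199) / 200 := by rw [if_pos (by omega)]; omega
      rw [hK, hC]
      by_cases hd : m % 200 = 0
      · rw [if_neg (by omega)]
        have hc2 : (m + 199) / 200 = m / 200 := by omega
        rw [hc2]
        simp only [List.map_map, List.nil_append]
        apply List.map_congr_left
        intro k hk
        simp only [List.mem_range] at hk
        simp only [Function.comp_apply, List.cons.injEq, and_true]
        omega
      · rw [if_pos (by omega)]
        have hc2 : (m + 199) / 200 = m / 200 + 1 := by omega
        rw [hc2, List.range_succ]
        simp only [List.map_append, List.map_map, List.nil_append]
        congr 1
        · apply List.map_congr_left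
          intro k hk
          simp only [List.mem_range] at hk
          simp only [Function.comp_apply, List.cons.injEq, and_true]
          omega
        · simp only [Function.comp_apply, List.map_cons, List.map_nil,
            List.cons.injEq, and_true]
          omega
    · simp only [if_neg h200, if_neg h0]
      rw [PySem.List.pyRange_of_pos 0 (m : Int) (by norm_num)]
      have hc : (if (0:Int) < (m:Int) then (((m:Int) - 0 + 200 - 1) / 200).toNat else 0) = 1 := by
        rw [if_pos (by omega)]
        omega
      rw [hc]
      simp
      omega

-- ===== VERDICT (by name: the statement is the Claim_ definition above) =====
theorem split_indices_spec : Claim_equal_split_indices := by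
  intro id_list _
  unfold Spec_split_indices split_indices_alt
  simp only []
  rw [split_indices_strided, rev_splitLoop (id_list.length : Int).toNat _ rfl]
  by_cases h0 : (id_list.length : Int) = 0
  · rw [if_pos h0, h0, strided_zero, if_pos rfl]
  · rw [if_neg h0, if_neg (strided_ne_nil _ (by omega))]
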